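-- pv_equiv track=rewrite | github.com/TDT4290-Group-1/Knitalytics | backend/helpers/hashtagStringParseHelpers.py | sort_popular_hashtags
-- ===== SOURCE A (Python) =====
-- from typing import List
--
-- def sort_popular_hashtags(hashtags: List[str]) -> List[str]:
--     popular_hashtags_count = {}
--     popular_hashtags = []
--     for hashtag in hashtags:
--         if hashtag not in popular_hashtags:
--             popular_hashtags.append(hashtag)
--             popular_hashtags_count[hashtag] = 1
--         else:
--             popular_hashtags_count[hashtag] += 1
--     popular_hashtags_count = sorted(
--         popular_hashtags_count, key=popular_hashtags_count.get, reverse=True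
--     )
--     return popular_hashtags_count
-- ===== SOURCE B (Python) =====
-- from typing import List
--
-- def sort_popular_hashtags(hashtags: List[str]) -> List[str]:
--     counts = {}
--     for h in hashtags:
--         counts[h] = counts.get(h, 0) + 1
--     buckets = {}
--     for h, c in counts.items():
--         buckets[c] = buckets.get(c, []) + [h]
--     result = []
--     for c in range(max(counts.values(), default=0), 0, -1):
--         result += buckets.get(c, [])
--     return result
-- ===== Notes on version B (the rewrite author's own statement) =====
-- stated objective: faster
-- what changed: Replaces A's O(n*u) duplicate check against a growing list plus a comparison sort with a single dict counting pass and counting-sort buckets keyed by frequency, concatenated from the highest count down (stable within equal counts by first appearance).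
import Mathlib
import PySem

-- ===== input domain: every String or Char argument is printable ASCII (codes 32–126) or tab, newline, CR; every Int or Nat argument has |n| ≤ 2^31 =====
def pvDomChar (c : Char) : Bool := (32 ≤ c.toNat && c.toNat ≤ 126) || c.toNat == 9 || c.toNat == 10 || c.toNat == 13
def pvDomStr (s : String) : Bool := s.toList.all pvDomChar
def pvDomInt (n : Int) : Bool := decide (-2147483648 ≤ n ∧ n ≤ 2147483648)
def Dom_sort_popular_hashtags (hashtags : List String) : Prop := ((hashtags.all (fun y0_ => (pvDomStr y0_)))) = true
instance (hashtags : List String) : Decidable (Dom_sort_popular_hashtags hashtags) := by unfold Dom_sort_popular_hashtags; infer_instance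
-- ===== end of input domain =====

-- B replaces A's membership-list counting pass and comparison sort by one dict counting pass plus
-- counting-sort buckets keyed by frequency, emitted from the highest count down (objective: faster).

-- ===== PORT A =====
-- Literal port of A. Python's sort key 'popular_hashtags_count.get' is only ever applied to keys of
-- that dict (the sorted iterable is the dict itself), where .get returns the stored int; it is
-- ported as 'getD _ 0', exact on those keys. 'popular_hashtags_count[hashtag] += 1' runs only when
-- the key is present, so 'modify _ 0 (· + 1)' is exact there.
def sort_popular_hashtags (hashtags : List String) : List String :=
  let st := hashtags.foldl
    (fun (st : PySem.Dict String Int × List String) hashtag =>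
      if st.2.contains hashtag = false then
        (st.1.insert hashtag 1, st.2 ++ [hashtag])
      else
        (st.1.modify hashtag 0 (· + 1), st.2))
    (PySem.Dict.empty, [])
  PySem.List.sorted st.1.keys (fun h => st.1.getD h 0) true

-- ===== PORT B =====
def sort_popular_hashtags_alt (hashtags : List String) : List String :=
  let counts : PySem.Dict String Int :=
    hashtags.foldl (fun d h => d.insert h (d.getD h 0 + 1)) PySem.Dict.empty
  let buckets : PySem.Dict Int (List String) :=
    counts.items.foldl (fun b p => b.modify p.2 [] (· ++ [p.1])) PySem.Dict.empty
  (PySem.List.pyRange (PySem.List.maxD counts.values (fun v => v) 0) 0 (-1)).foldl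
    (fun r c => r ++ buckets.getD c []) []

-- ===== PRECONDITION & SPEC =====
def Spec_sort_popular_hashtags (hashtags : List String) (out : List String) : Prop := out = sort_popular_hashtags_alt hashtags
instance (hashtags : List String) (out : List String) : Decidable (Spec_sort_popular_hashtags hashtags out) := by unfold Spec_sort_popular_hashtags; infer_instance

-- ===== CLAIM (what is proved, stated in full; the proofs are below) =====
def Claim_equal_sort_popular_hashtags : Prop := ∀ (hashtags : List String), Dom_sort_popular_hashtags hashtags → Spec_sort_popular_hashtags hashtags (sort_popular_hashtags hashtags)

-- ===== LEMMAS AND PROOFS =====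

-- insertBy puts x in front when it goes before everything
theorem insertBy_front {α : Type} (bf : α → α → Bool) (x : α) (l : List α)
    (h : ∀ y ∈ l, bf x y = true) : PySem.List.insertBy bf x l = x :: l := by
  cases l with
  | nil => simp [PySem.List.insertBy]
  | cons y ys => simp [PySem.List.insertBy, h y (by simp)]

-- insertBy skips a prefix it does not go before
theorem insertBy_skip {α : Type} (bf : α → α → Bool) (x : α) (l1 l2 : List α)
    (h : ∀ y ∈ l1, bf x y = false) :
    PySem.List.insertBy bf x (l1 ++ l2) = l1 ++ PySem.List.insertBy bf x l2 := by
  induction l1 with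
  | nil => simp
  | cons y ys ih =>
    simp only [List.cons_append, PySem.List.insertBy, h y (by simp)]
    simp only [Bool.false_eq_true, if_false]
    rw [ih (fun z hz => h z (by simp [hz]))]

-- inserting x (descending by key) into buckets listed from count M down to 1 lands at the end of its bucket
theorem insertBy_flatMap {α : Type} (key : α → Int) (x : α) (g : Int → List α)
    (hg : ∀ c y, y ∈ g c → key y = c) :
    ∀ (n : Nat) (M : Int), M = n → 0 < key x → key x ≤ M →
    PySem.List.insertBy (fun a b => decide (key b < key a)) x
        ((PySem.List.pyRange M 0 (-1)).flatMap g)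
      = (PySem.List.pyRange M 0 (-1)).flatMap
          (fun c => if c = key x then g c ++ [x] else g c) := by
  intro n
  induction n with
  | zero => intro M hM h1 h2; omega
  | succ n ih =>
    intro M hM h1 h2
    have hM0 : (0:Int) < M := by omega
    rw [PySem.List.pyRange_neg_one_cons hM0]
    simp only [List.flatMap_cons]
    by_cases hkx : key x = M
    · -- skip g M (ties keep original order), then x goes in front of everything smaller
      rw [insertBy_skip _ _ _ _ (fun y hy => by simp [hg M y hy, hkx])]
      rw [insertBy_front _ _ _ (fun y hy => by
        rcases List.mem_flatMap.1 hy with ⟨c, hc, hyc⟩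
        have hcr := (PySem.List.mem_pyRange_neg_one).1 hc
        have := hg c y hyc
        simp only [decide_eq_true_eq]
        omega)]
      have hrest : (PySem.List.pyRange (M-1) 0 (-1)).flatMap
          (fun c => if c = key x then g c ++ [x] else g c)
          = (PySem.List.pyRange (M-1) 0 (-1)).flatMap g := by
        apply List.flatMap_congr
        intro c hc
        have hcr := (PySem.List.mem_pyRange_neg_one).1 hc
        have : ¬ (c = key x) := by omega
        simp [this]
      rw [hrest, if_pos hkx.symm]
      simp
    · -- key x < M : skip bucket M entirely and recurse
      rw [insertBy_skip _ _ _ _ (fun y hy => by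
        have := hg M y hy
        simp only [decide_eq_false_iff_not, this]
        omega)]
      rw [ih (M-1) (by omega) h1 (by omega)]
      rw [if_neg (by omega)]

-- Python's stable descending sort by an int key in [1, M] is the concatenation of the
-- key-c elements (in original order), for c from M down to 1
theorem sorted_rev_eq_buckets {α : Type} (key : α → Int) (M : Int) :
    ∀ us : List α, (∀ y ∈ us, 0 < key y ∧ key y ≤ M) →
    PySem.List.sorted us key true
      = (PySem.List.pyRange M 0 (-1)).flatMap
          (fun c => us.filter (fun y => decide (key y = c))) := by
  intro us
  induction us using List.reverseRecOn with
  | nil => simp [PySem.List.sorted]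
  | append_singleton us x ih =>
    intro hb
    rw [PySem.List.sorted_rev_eq_foldl_insertBy, List.foldl_append,
        ← PySem.List.sorted_rev_eq_foldl_insertBy]
    simp only [List.foldl_cons, List.foldl_nil]
    rw [ih (fun y hy => hb y (by simp [hy]))]
    obtain ⟨hx1, hx2⟩ := hb x (by simp)
    rw [insertBy_flatMap key x _ (fun c y hy => by
          have := List.of_mem_filter hy
          simpa using this)
        M.toNat M (by omega) hx1 hx2]
    apply List.flatMap_congr
    intro c hc
    rw [List.filter_append]
    simp only [List.filter_cons, List.filter_nil]
    by_cases h : c = key x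
    · simp [h]
    · have : ¬ (key x = c) := fun hh => h hh.symm
      simp [h, this]

-- A's loop: the visited-list is always the dict's key list, and the dict counts the prefix
theorem A_loop : ∀ (l : List String) (d : PySem.Dict String Int) (pop : List String),
    pop = d.keys →
    let r := l.foldl
      (fun (st : PySem.Dict String Int × List String) hashtag =>
        if st.2.contains hashtag = false then
          (st.1.insert hashtag 1, st.2 ++ [hashtag])
        else
          (st.1.modify hashtag 0 (· + 1), st.2)) (d, pop)
    r.2 = r.1.keys ∧ (∀ k, r.1.getD k 0 = d.getD k 0 + l.count k) ∧
      r.1.keys = PySem.Set.update d.keys l := by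
  intro l
  induction l with
  | nil => intro d pop hp; simpa [PySem.Set.update] using hp
  | cons x l ih =>
    intro d pop hp
    simp only [List.foldl_cons]
    by_cases hcm : x ∈ pop
    · have hmemk : x ∈ d.keys := hp ▸ hcm
      have hdc : d.contains x = true :=
        (PySem.Dict.contains_iff_mem_keys d x).2 hmemk
      have hkeys : (d.modify x 0 (· + 1)).keys = d.keys := by
        rw [PySem.Dict.keys_modify, PySem.Dict.keys_insert_of_contains _ _ hdc]
      rw [if_neg (by simp; exact hcm)]
      obtain ⟨h1, h2, h3⟩ := ih (d.modify x 0 (· + 1)) pop (by rw [hp, hkeys])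
      refine ⟨h1, fun k => ?_, ?_⟩
      · rw [h2 k, PySem.Dict.getD_modify, List.count_cons]
        by_cases hk : k = x
        · subst hk; simp; omega
        · have : ¬ (x = k) := fun hh => hk hh.symm
          simp [hk, this]
      · rw [h3, hkeys]
        have hadd : PySem.Set.add d.keys x = d.keys := by
          simp [PySem.Set.add, PySem.Set.contains, hmemk]
        simp only [PySem.Set.update, List.foldl_cons, hadd]
    · have hc : pop.contains x = false := by
        rw [← Bool.not_eq_true]; exact fun hh => hcm (List.mem_of_elem_eq_true hh)
      have hdc : d.contains x = false := by
        rw [← Bool.not_eq_true, PySem.Dict.contains_iff_mem_keys]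
        exact fun hh => hcm (hp ▸ hh)
      have hkeys : (d.insert x 1).keys = d.keys ++ [x] :=
        PySem.Dict.keys_insert_of_not_contains d 1 hdc
      rw [if_pos hc]
      obtain ⟨h1, h2, h3⟩ := ih (d.insert x 1) (pop ++ [x]) (by rw [hp, hkeys])
      refine ⟨h1, fun k => ?_, ?_⟩
      · rw [h2 k, PySem.Dict.getD_insert, List.count_cons]
        by_cases hk : k = x
        · subst hk
          rw [PySem.Dict.getD_of_not_contains d 0 hdc]
          simp; omega
        · have : ¬ (x = k) := fun hh => hk hh.symm
          simp [hk, this]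
      · rw [h3, hkeys]
        have hmem : x ∉ d.keys := fun hh => hcm (hp ▸ hh)
        have hadd : PySem.Set.add d.keys x = d.keys ++ [x] := by
          simp [PySem.Set.add, PySem.Set.contains, hmem]
        simp only [PySem.Set.update, List.foldl_cons, hadd]

-- max? of a nonempty list is some
theorem max?_isSome_of_ne_nil {α κ : Type} [LT κ] [DecidableLT κ] (xs : List α) (key : α → κ)
    (h : xs ≠ []) : (PySem.List.max? xs key).isSome := by
  have aux : ∀ (l : List α) (a : α),
      (List.foldl (fun acc x =>
        match acc with
        | none => some x
        | some m => if key m < key x then some x else some m) (some a) l).isSome := by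
    intro l
    induction l with
    | nil => intro a; rfl
    | cons y l ih =>
      intro a
      simp only [List.foldl_cons]
      by_cases hx : key a < key y
      · simpa [hx] using ih y
      · simpa [hx] using ih a
  cases xs with
  | nil => exact absurd rfl h
  | cons x xs => simpa [PySem.List.max?] using aux xs x

-- ===== VERDICT (by name: the statement is the Claim_ definition above) =====
theorem sort_popular_hashtags_spec : Claim_equal_sort_popular_hashtags := by
  intro hashtags _
  unfold Spec_sort_popular_hashtags sort_popular_hashtags sort_popular_hashtags_alt
  simp only []
  -- names
  set us : List String := PySem.Set.ofList hashtags with hus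
  have hcounter := PySem.Dict.foldl_insert_getD_add_one_eq_counter hashtags
  rw [hcounter]
  have hitems := PySem.Dict.items_counter hashtags
  -- A's loop facts
  obtain ⟨h1, h2, h3⟩ := A_loop hashtags PySem.Dict.empty [] (by rw [PySem.Dict.keys_empty])
  rw [h3, PySem.Dict.keys_empty]
  have hupd : PySem.Set.update ([] : List String) hashtags = us := by
    rw [hus, PySem.Set.ofList_eq_foldl]; rfl
  rw [hupd]
  have hkeyfun : (fun h => (List.foldl
      (fun (st : PySem.Dict String Int × List String) hashtag =>
        if st.2.contains hashtag = false then
          (st.1.insert hashtag 1, st.2 ++ [hashtag])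
        else
          (st.1.modify hashtag 0 (· + 1), st.2)) (PySem.Dict.empty, []) hashtags).1.getD h 0)
      = (fun h => (hashtags.count h : Int)) := by
    funext k
    rw [h2 k, PySem.Dict.getD_empty]
    simp
  rw [hkeyfun]
  -- B's values and max
  have hvalues : (PySem.Dict.counter hashtags).values = us.map (fun k => (hashtags.count k : Int)) := by
    show (PySem.Dict.counter hashtags).items.map (·.2) = _
    rw [hitems, List.map_map]
    rfl
  set M : Int := PySem.List.maxD (PySem.Dict.counter hashtags).values (fun v => v) 0 with hM
  -- bounds
  have hbound : ∀ y ∈ us, 0 < (hashtags.count y : Int) ∧ (hashtags.count y : Int) ≤ M := by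
    intro y hy
    have hym : y ∈ hashtags := (PySem.Set.mem_ofList hashtags y).1 hy
    refine ⟨by exact_mod_cast List.count_pos_iff.2 hym, ?_⟩
    have hv : (hashtags.count y : Int) ∈ (PySem.Dict.counter hashtags).values := by
      rw [hvalues]; exact List.mem_map_of_mem hy
    have hne : (PySem.Dict.counter hashtags).values ≠ [] := by
      intro hnil; rw [hnil] at hv; exact (List.not_mem_nil) hv
    obtain ⟨m, hm⟩ := Option.isSome_iff_exists.1
      (max?_isSome_of_ne_nil (PySem.Dict.counter hashtags).values (fun v => v) hne)
    have := PySem.List.max?_isMax hm _ hv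
    rw [hM]
    simp only [PySem.List.maxD, hm, Option.getD_some]
    exact this
  -- A = stable descending sort = buckets
  rw [sorted_rev_eq_buckets (fun h => (hashtags.count h : Int)) M us hbound]
  -- B = the same buckets
  have hbucket : ∀ c : Int,
      ((PySem.Dict.counter hashtags).items.foldl
        (fun b p => b.modify p.2 [] (· ++ [p.1])) PySem.Dict.empty).getD c []
      = us.filter (fun y => decide ((hashtags.count y : Int) = c)) := by
    intro c
    rw [show ((PySem.Dict.counter hashtags).items.foldl
        (fun (b : PySem.Dict Int (List String)) p => b.modify p.2 [] (· ++ [p.1])) PySem.Dict.empty)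
      = (((PySem.Dict.counter hashtags).items.map (fun p => (p.2, p.1))).foldl
        (fun (b : PySem.Dict Int (List String)) q => b.modify q.1 [] (· ++ [q.2])) PySem.Dict.empty)
      from (List.foldl_map (f := fun p : String × Int => (p.2, p.1))
        (g := fun (b : PySem.Dict Int (List String)) q => b.modify q.1 [] (· ++ [q.2]))
        (l := (PySem.Dict.counter hashtags).items) (init := PySem.Dict.empty)).symm]
    rw [PySem.Dict.getD_foldl_modify_append]
    rw [PySem.Dict.getD_empty, List.nil_append]
    rw [hitems, List.map_map, List.filter_map, List.map_map]
    simp only [Function.comp_def]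
    rw [show (List.map (fun k : String => k) = fun l => l) from funext List.map_id']
    rfl
  rw [PySem.List.foldl_append_eq_flatMap, List.nil_append]
  apply List.flatMap_congr
  intro c _
  exact (hbucket c).symm
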